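-- pv_equiv track=rewrite | github.com/lcl-hse/heptabot | models.py | merge_diff
-- ===== SOURCE A (Python) =====
-- def merge_diff(difflist):
--     outlist = []
--     errlist = []
--
--     prev0, prev1 = False, False
--     z = [0, ""]
--     e = [-1, ""]
--     c = [1, ""]
--
--     for t, dstr in difflist:
--         if t == 0:
--             if prev1:
--                 outlist.append(tuple(e))
--                 outlist.append(tuple(c))
--                 errlist.append([e[1], c[1]])
--             z[1] += dstr
--             if not prev0:
--                 prev0, prev1 = True, False
--                 e = [-1, ""]
--                 c = [1, ""]
--         else:
--             if prev0:
--                 outlist.append(tuple(z))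
--             if t == 1:
--                 c[1] += dstr
--             else:
--                 e[1] += dstr
--             if not prev1:
--                 prev0, prev1 = False, True
--                 z = [0, ""]
--
--     if prev0:
--         outlist.append(tuple(z))
--     if prev1:
--         outlist.append(tuple(e))
--         outlist.append(tuple(c))
--         errlist.append([e[1], c[1]])
--
--     return outlist, errlist
-- ===== SOURCE B (Python) =====
-- def _emit(run, outlist, errlist):
--     if run[0][0] == 0:
--         outlist.append((0, "".join(d for _, d in run)))
--     else:
--         e = "".join(d for t, d in run if t != 1)
--         c = "".join(d for t, d in run if t == 1)
--         outlist.append((-1, e))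
--         outlist.append((1, c))
--         errlist.append([e, c])
--
-- def merge_diff(difflist):
--     outlist, errlist = [], []
--     run = []
--     for td in difflist:
--         if run and (run[0][0] == 0) != (td[0] == 0):
--             _emit(run, outlist, errlist)
--             run = []
--         run.append(td)
--     if run:
--         _emit(run, outlist, errlist)
--     return outlist, errlist
-- ===== Notes on version B (the rewrite author's own statement) =====
-- stated objective: simpler
-- what changed: Replaced A's four-boolean-flag incremental state machine (prev0/prev1 with mutable z/e/c accumulators and flush points) by buffering each maximal run of same-kind entries and emitting it once with string joins over the run.
import Mathlib
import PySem

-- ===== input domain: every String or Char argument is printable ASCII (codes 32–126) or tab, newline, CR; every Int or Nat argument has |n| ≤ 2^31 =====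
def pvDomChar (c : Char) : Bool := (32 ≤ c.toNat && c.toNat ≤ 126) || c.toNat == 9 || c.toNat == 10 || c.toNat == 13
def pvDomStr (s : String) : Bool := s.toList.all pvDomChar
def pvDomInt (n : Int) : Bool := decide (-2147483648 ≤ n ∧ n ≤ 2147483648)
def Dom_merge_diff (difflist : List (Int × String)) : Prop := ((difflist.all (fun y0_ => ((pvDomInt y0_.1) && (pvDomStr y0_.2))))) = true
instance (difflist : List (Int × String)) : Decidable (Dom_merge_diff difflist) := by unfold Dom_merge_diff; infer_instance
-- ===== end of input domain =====

-- B replaces A's four-flag incremental state machine by buffering each maximal run and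
-- emitting it with joins (objective: simpler decomposition; same O(n) cost).

-- ===== PORT A =====
-- A's loop state: (outlist, errlist, prev0, prev1, z, e, c)
def merge_diff_step :
    (List (Int × String) × List (List String) × Bool × Bool × (Int × String) × (Int × String) × (Int × String)) →
    (Int × String) →
    (List (Int × String) × List (List String) × Bool × Bool × (Int × String) × (Int × String) × (Int × String))
  | (outlist, errlist, prev0, prev1, z, e, c), (t, dstr) =>
    if t = 0 then
      let outlist := if prev1 then outlist ++ [e, c] else outlist
      let errlist := if prev1 then errlist ++ [[e.2, c.2]] else errlist
      let z := (z.1, z.2 ++ dstr)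
      if !prev0 then (outlist, errlist, true, false, z, (-1, ""), (1, ""))
      else (outlist, errlist, prev0, prev1, z, e, c)
    else
      let outlist := if prev0 then outlist ++ [z] else outlist
      let e := if t = 1 then e else (e.1, e.2 ++ dstr)
      let c := if t = 1 then (c.1, c.2 ++ dstr) else c
      if !prev1 then (outlist, errlist, false, true, (0, ""), e, c)
      else (outlist, errlist, prev0, prev1, z, e, c)

def merge_diff (difflist : List (Int × String)) : (List (Int × String)) × List (List String) :=
  match difflist.foldl merge_diff_step ([], [], false, false, (0, ""), (-1, ""), (1, "")) with
  | (outlist, errlist, prev0, prev1, z, e, c) =>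
    let outlist := if prev0 then outlist ++ [z] else outlist
    let outlist := if prev1 then outlist ++ [e, c] else outlist
    let errlist := if prev1 then errlist ++ [[e.2, c.2]] else errlist
    (outlist, errlist)

-- ===== PORT B =====
-- "".join(d for t, d in run if p t)
def joinIf (p : Int → Bool) : List (Int × String) → String
  | [] => ""
  | (t, d) :: r => (if p t then d else "") ++ joinIf p r

def merge_diff_emit (run : List (Int × String)) (outlist : List (Int × String))
    (errlist : List (List String)) : List (Int × String) × List (List String) :=
  match run with
  | [] => (outlist, errlist)
  | (t0, _) :: _ =>
    if t0 = 0 then (outlist ++ [(0, joinIf (fun _ => true) run)], errlist)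
    else
      let e := joinIf (fun t => !(t == 1)) run
      let c := joinIf (fun t => t == 1) run
      (outlist ++ [(-1, e), (1, c)], errlist ++ [[e, c]])

def merge_diff_alt_step (st : List (Int × String) × List (List String) × List (Int × String))
    (td : Int × String) : List (Int × String) × List (List String) × List (Int × String) :=
  match st with
  | (outlist, errlist, run) =>
    match run with
    | [] => (outlist, errlist, [td])
    | (t0, _) :: _ =>
      if (decide (t0 = 0)) ≠ (decide (td.1 = 0)) then
        match merge_diff_emit run outlist errlist with
        | (outlist, errlist) => (outlist, errlist, [td])
      else (outlist, errlist, run ++ [td])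

def merge_diff_alt (difflist : List (Int × String)) : (List (Int × String)) × List (List String) :=
  match difflist.foldl merge_diff_alt_step ([], [], []) with
  | (outlist, errlist, []) => (outlist, errlist)
  | (outlist, errlist, run) => merge_diff_emit run outlist errlist

-- ===== PRECONDITION & SPEC =====
def Spec_merge_diff (difflist : List (Int × String)) (out : (List (Int × String)) × List (List String)) : Prop := out = merge_diff_alt difflist
instance (difflist : List (Int × String)) (out : (List (Int × String)) × List (List String)) : Decidable (Spec_merge_diff difflist out) := by unfold Spec_merge_diff; infer_instance

-- ===== CLAIM (what is proved, stated in full; the proofs are below) =====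
def Claim_equal_merge_diff : Prop := ∀ (difflist : List (Int × String)), Dom_merge_diff difflist → Spec_merge_diff difflist (merge_diff difflist)

-- ===== LEMMAS AND PROOFS =====

-- A's reachable loop state, expressed from B's buffered run
def stateOf (outlist : List (Int × String)) (errlist : List (List String))
    (run : List (Int × String)) :
    List (Int × String) × List (List String) × Bool × Bool × (Int × String) × (Int × String) × (Int × String) :=
  match run with
  | [] => (outlist, errlist, false, false, (0, ""), (-1, ""), (1, ""))
  | (t0, _) :: _ =>
    if t0 = 0 then (outlist, errlist, true, false, (0, joinIf (fun _ => true) run), (-1, ""), (1, ""))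
    else (outlist, errlist, false, true, (0, ""),
      (-1, joinIf (fun t => !(t == 1)) run), (1, joinIf (fun t => t == 1) run))

lemma joinIf_append (p : Int → Bool) (l : List (Int × String)) (t : Int) (d : String) :
    joinIf p (l ++ [(t, d)]) = joinIf p l ++ (if p t then d else "") := by
  induction l with
  | nil => simp [joinIf]
  | cons x r ih =>
    obtain ⟨tx, dx⟩ := x
    simp [joinIf, ih, String.append_assoc]

lemma step_agree (outlist : List (Int × String)) (errlist : List (List String))
    (run : List (Int × String)) (td : Int × String) :
    merge_diff_step (stateOf outlist errlist run) td =
      (match merge_diff_alt_step (outlist, errlist, run) td with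
       | (o, e, r) => stateOf o e r) := by
  obtain ⟨t, d⟩ := td
  cases run with
  | nil =>
    by_cases ht : t = 0 <;> by_cases h1 : t = 1 <;>
      simp [stateOf, merge_diff_step, merge_diff_alt_step, joinIf, ht, h1]
  | cons hd tl =>
    obtain ⟨t0, d0⟩ := hd
    by_cases h0 : t0 = 0 <;> by_cases ht : t = 0 <;> by_cases h1 : t = 1 <;>
      simp [stateOf, merge_diff_step, merge_diff_alt_step, merge_diff_emit,
        joinIf, joinIf_append, h0, ht, h1, String.append_assoc]

lemma fold_agree (l : List (Int × String)) (outlist : List (Int × String))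
    (errlist : List (List String)) (run : List (Int × String)) :
    l.foldl merge_diff_step (stateOf outlist errlist run) =
      (match l.foldl merge_diff_alt_step (outlist, errlist, run) with
       | (o, e, r) => stateOf o e r) := by
  induction l generalizing outlist errlist run with
  | nil => simp
  | cons td rest ih =>
    rw [List.foldl_cons, List.foldl_cons, step_agree]
    rcases h : merge_diff_alt_step (outlist, errlist, run) td with ⟨o, e, r⟩
    simp [ih]

lemma finish_agree (outlist : List (Int × String)) (errlist : List (List String))
    (run : List (Int × String)) :
    (match stateOf outlist errlist run with
     | (o, e, p0, p1, z, ee, cc) =>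
       let o := if p0 then o ++ [z] else o
       let o := if p1 then o ++ [ee, cc] else o
       let e := if p1 then e ++ [[ee.2, cc.2]] else e
       (o, e)) =
      (match (outlist, errlist, run) with
       | (o, e, ([] : List (Int × String))) => (o, e)
       | (o, e, r) => merge_diff_emit r o e) := by
  cases run with
  | nil => simp [stateOf]
  | cons hd tl =>
    obtain ⟨t0, d0⟩ := hd
    by_cases h0 : t0 = 0 <;> simp [stateOf, merge_diff_emit, h0]

-- ===== VERDICT (by name: the statement is the Claim_ definition above) =====
theorem merge_diff_spec : Claim_equal_merge_diff := by
  intro difflist _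
  unfold Spec_merge_diff merge_diff merge_diff_alt
  have h0 : ([], [], false, false, ((0 : Int), ""), ((-1 : Int), ""), ((1 : Int), "")) =
      stateOf [] [] [] := rfl
  rw [h0, fold_agree]
  rcases h : difflist.foldl merge_diff_alt_step ([], [], []) with ⟨o, e, r⟩
  have := finish_agree o e r
  cases r with
  | nil => simpa using this
  | cons hd tl => simpa using this
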